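-- pv_equiv track=rewrite | github.com/LamarckLab/022_PythonTip_Exercises | 028.py | get_sorted_keys_values
-- ===== SOURCE A (Python) =====
-- def get_sorted_keys_values(dict_obj):
--     # 此处写你的代码
--     key_list = []
--     for element in dict_obj:
--         key_list.append(element)
--     sorted_list = sorted(key_list)
--     value_list = []
--     for element in sorted_list:
--         value_list.append(dict_obj[element])
--     return [sorted_list,value_list]
-- ===== SOURCE B (Python) =====
-- def get_sorted_keys_values(dict_obj):
--     # Hand-written merge sort on the key-value pairs (compared by key; keys are
--     # unique), then project keys and values out. No built-in sort, no dict lookups.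
--     def merge(xs, ys):
--         out = []
--         i = j = 0
--         while i < len(xs) and j < len(ys):
--             if ys[j][0] < xs[i][0]:
--                 out.append(ys[j]); j += 1
--             else:
--                 out.append(xs[i]); i += 1
--         out.extend(xs[i:])
--         out.extend(ys[j:])
--         return out
--
--     def msort(ps):
--         if len(ps) <= 1:
--             return ps
--         mid = len(ps) // 2
--         return merge(msort(ps[:mid]), msort(ps[mid:]))
--
--     pairs = msort(list(dict_obj.items()))
--     keys = [p[0] for p in pairs]
--     values = [p[1] for p in pairs]
--     return [keys, values]
-- ===== Notes on version B (the rewrite author's own statement) =====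
-- stated objective: alternative
-- what changed: B replaces A's built-in key sort plus a second loop of per-key dict lookups by a hand-written merge sort over the key-value pairs (split, recurse, merge by key), so no sort call and no dict lookup remain.
import Mathlib
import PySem

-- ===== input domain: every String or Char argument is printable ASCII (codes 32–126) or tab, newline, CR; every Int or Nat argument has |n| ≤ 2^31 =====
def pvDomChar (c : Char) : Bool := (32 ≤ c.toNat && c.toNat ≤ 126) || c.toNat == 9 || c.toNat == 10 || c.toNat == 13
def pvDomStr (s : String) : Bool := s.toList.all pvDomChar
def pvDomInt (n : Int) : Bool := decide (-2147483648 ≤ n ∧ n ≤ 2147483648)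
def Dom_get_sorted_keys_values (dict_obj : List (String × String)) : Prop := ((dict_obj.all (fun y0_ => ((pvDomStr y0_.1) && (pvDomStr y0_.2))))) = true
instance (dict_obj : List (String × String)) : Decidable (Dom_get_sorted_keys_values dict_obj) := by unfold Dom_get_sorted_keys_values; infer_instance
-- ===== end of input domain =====

-- B replaces A's built-in sort of the keys plus a second loop of dict lookups by a
-- hand-written merge sort over the key-value pairs; objective: alternative.


-- ===== PORT A =====
-- 'for element in dict_obj' iterates the keys in insertion order; dict_obj[element] is a
-- dict lookup whose key is always present (it came from the dict itself), so the total
-- getD with a dummy default is exact here.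
def get_sorted_keys_values (dict_obj : List (String × String)) : List (List String) :=
  let key_list := dict_obj.foldl (fun acc p => acc ++ [p.1]) []
  let sorted_list := PySem.List.sorted key_list (fun k => k) false
  let value_list := sorted_list.foldl
    (fun acc k => acc ++ [PySem.Dict.getD (PySem.Dict.mk dict_obj) k ""]) []
  [sorted_list, value_list]

-- ===== PORT B =====
-- the inner while-loop of Source B's merge: compare heads by key, pop the smaller
-- (ties keep the left side, exactly the 'else' branch); the extends are the tails.
def pvMerge : List (String × String) → List (String × String) → List (String × String)
  | [], ys => ys
  | x :: xs, [] => x :: xs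
  | x :: xs, y :: ys =>
    if y.1 < x.1 then y :: pvMerge (x :: xs) ys
    else x :: pvMerge xs (y :: ys)
  termination_by xs ys => xs.length + ys.length

-- msort: lists of length <= 1 are sorted; otherwise split at len // 2, recurse, merge.
def pvMSort (ps : List (String × String)) : List (String × String) :=
  if ps.length ≤ 1 then ps
  else
    let mid := ps.length / 2
    pvMerge (pvMSort (ps.take mid)) (pvMSort (ps.drop mid))
  termination_by ps.length
  decreasing_by
  · simp only [List.length_take]
    omega
  · simp only [List.length_drop]
    omega

def get_sorted_keys_values_alt (dict_obj : List (String × String)) : List (List String) :=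
  let pairs := pvMSort dict_obj
  let keys := pairs.map (fun p => p.1)
  let values := pairs.map (fun p => p.2)
  [keys, values]

-- ===== PRECONDITION & SPEC =====
-- Pre_ requires pairwise-distinct keys: a Python dict cannot hold duplicate keys, so an
-- association list with a repeated key does not represent any input A receives.
def Pre_get_sorted_keys_values (dict_obj : List (String × String)) : Prop :=
  dict_obj.Pairwise (fun p q => p.1 ≠ q.1)
instance (dict_obj : List (String × String)) : Decidable (Pre_get_sorted_keys_values dict_obj) := by unfold Pre_get_sorted_keys_values; infer_instance

def pvWitness_get_sorted_keys_values : (List (String × String)) :=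
  [("b", "2"), ("a", "1"), ("c", "3")]

def Spec_get_sorted_keys_values (dict_obj : List (String × String)) (out : List (List String)) : Prop := out = get_sorted_keys_values_alt dict_obj
instance (dict_obj : List (String × String)) (out : List (List String)) : Decidable (Spec_get_sorted_keys_values dict_obj out) := by unfold Spec_get_sorted_keys_values; infer_instance

-- ===== CLAIM (what is proved, stated in full; the proofs are below) =====
def Claim_equal_get_sorted_keys_values : Prop := ∀ (dict_obj : List (String × String)), Dom_get_sorted_keys_values dict_obj → Pre_get_sorted_keys_values dict_obj → Spec_get_sorted_keys_values dict_obj (get_sorted_keys_values dict_obj)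

-- ===== LEMMAS AND PROOFS =====

lemma pvMerge_perm (xs ys : List (String × String)) :
    (pvMerge xs ys).Perm (xs ++ ys) := by
  induction xs, ys using pvMerge.induct with
  | case1 ys => simp [pvMerge]
  | case2 x xs => simp [pvMerge]
  | case3 x xs y ys h ih =>
    simp only [pvMerge, if_pos h]
    have h1 : (y :: pvMerge (x :: xs) ys).Perm (y :: ((x :: xs) ++ ys)) := ih.cons y
    have h2 : (y :: ((x :: xs) ++ ys)).Perm ((x :: xs) ++ y :: ys) :=
      (List.perm_middle).symm
    exact h1.trans h2
  | case4 x xs y ys h ih =>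
    simp only [pvMerge, if_neg h]
    exact (ih.cons x)

lemma pvMerge_pairwise (xs ys : List (String × String))
    (hx : xs.Pairwise (fun p q => p.1 ≤ q.1)) (hy : ys.Pairwise (fun p q => p.1 ≤ q.1)) :
    (pvMerge xs ys).Pairwise (fun p q => p.1 ≤ q.1) := by
  induction xs, ys using pvMerge.induct with
  | case1 ys => simpa [pvMerge] using hy
  | case2 x xs => simpa [pvMerge] using hx
  | case3 x xs y ys h ih =>
    rcases List.pairwise_cons.mp hy with ⟨hy1, hy2⟩
    simp only [pvMerge, if_pos h]
    refine List.pairwise_cons.mpr ⟨?_, ih hx hy2⟩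
    intro p hp
    have hp1 : p ∈ (x :: xs) ++ ys := (pvMerge_perm _ _).mem_iff.mp hp
    rcases List.mem_append.mp hp1 with hp2 | hp2
    · rcases List.mem_cons.mp hp2 with rfl | hp3
      · exact le_of_lt h
      · exact le_trans (le_of_lt h) ((List.pairwise_cons.mp hx).1 p hp3)
    · exact hy1 p hp2
  | case4 x xs y ys h ih =>
    rcases List.pairwise_cons.mp hx with ⟨hx1, hx2⟩
    simp only [pvMerge, if_neg h]
    refine List.pairwise_cons.mpr ⟨?_, ih hx2 hy⟩
    intro p hp
    have hp1 : p ∈ xs ++ y :: ys := (pvMerge_perm _ _).mem_iff.mp hp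
    rcases List.mem_append.mp hp1 with hp2 | hp2
    · exact hx1 p hp2
    · rcases List.mem_cons.mp hp2 with rfl | hp3
      · exact not_lt.mp h
      · exact le_trans (not_lt.mp h) ((List.pairwise_cons.mp hy).1 p hp3)

lemma pvMSort_perm (ps : List (String × String)) : (pvMSort ps).Perm ps := by
  induction ps using pvMSort.induct with
  | case1 ps h =>
    rw [pvMSort, if_pos h]
  | case2 ps h mid ih1 ih2 =>
    rw [pvMSort, if_neg h]
    have h1 := (pvMerge_perm (pvMSort (ps.take (ps.length / 2)))
      (pvMSort (ps.drop (ps.length / 2))))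
    have h2 : ((ps.take (ps.length / 2)) ++ (ps.drop (ps.length / 2))) = ps :=
      List.take_append_drop _ ps
    have h3 : ((ps.take (ps.length / 2)) ++ (ps.drop (ps.length / 2))).Perm ps := by
      rw [h2]
    exact h1.trans ((ih1.append ih2).trans h3)

lemma pvMSort_pairwise (ps : List (String × String)) :
    (pvMSort ps).Pairwise (fun p q => p.1 ≤ q.1) := by
  induction ps using pvMSort.induct with
  | case1 ps h =>
    rw [pvMSort, if_pos h]
    match ps, h with
    | [], _ => simp
    | [p], _ => simp
  | case2 ps h mid ih1 ih2 =>
    rw [pvMSort, if_neg h]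
    exact pvMerge_pairwise _ _ ih1 ih2

-- With distinct keys, B's merge-sorted pairs are exactly the sorted key list
-- decorated with the dict's values — i.e. what A computes.
lemma pvMSort_eq (xs : List (String × String))
    (hpre : xs.Pairwise (fun p q => p.1 ≠ q.1)) :
    pvMSort xs
      = (PySem.List.sorted (xs.map (fun p => p.1)) (fun k => k) false).map
          (fun k => (k, PySem.Dict.getD (PySem.Dict.mk xs) k "")) := by
  set s2 := pvMSort xs with hs2
  set sk := PySem.List.sorted (xs.map (fun p => p.1)) (fun k => k) false with hsk
  set ys := sk.map (fun k => (k, PySem.Dict.getD (PySem.Dict.mk xs) k "")) with hys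
  have hkeysnodup : (xs.map (fun p => p.1)).Nodup := (List.pairwise_map).mpr hpre
  have hperm2 : s2.Perm xs := pvMSort_perm xs
  have hne2 : s2.Pairwise (fun p q : String × String => p.1 ≠ q.1) :=
    ((List.Perm.pairwise_iff (fun h => h.symm) hperm2).mpr hpre)
  have hlt2 : s2.Pairwise (fun p q : String × String => p.1 < q.1) := by
    refine ((pvMSort_pairwise xs).and hne2).imp ?_
    rintro a b ⟨hle, hne⟩
    exact lt_of_le_of_ne hle hne
  have hskperm : sk.Perm (xs.map (fun p => p.1)) := PySem.List.sorted_perm _ _ false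
  have hsknodup : sk.Nodup := (hskperm.nodup_iff).mpr hkeysnodup
  have hskle : sk.Pairwise (fun a b : String => a ≤ b) := by
    rw [hsk]
    exact PySem.List.sorted_pairwise (xs.map (fun p => p.1)) (fun k => k)
  have hsklt : sk.Pairwise (fun a b : String => a < b) := by
    refine (hskle.and hsknodup).imp ?_
    rintro a b ⟨hle, hne⟩
    exact lt_of_le_of_ne hle hne
  have hltys : ys.Pairwise (fun p q : String × String => p.1 < q.1) := by
    rw [hys]
    exact (List.pairwise_map).mpr hsklt
  have hmapself : xs.map (fun p => ((fun p : String × String => p.1) p,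
      PySem.Dict.getD (PySem.Dict.mk xs) p.1 "")) = xs := by
    have : ∀ p ∈ xs, (p.1, PySem.Dict.getD (PySem.Dict.mk xs) p.1 "") = p := by
      intro p hp
      have hmem : (p.1, p.2) ∈ (PySem.Dict.mk xs).items := by simpa using hp
      have hkeys : (PySem.Dict.mk xs).keys.Nodup := by
        simpa [PySem.Dict.keys] using hkeysnodup
      have := PySem.Dict.getD_of_mem_items (PySem.Dict.mk xs) hmem hkeys ""
      simp [this]
    calc xs.map _ = xs.map id := List.map_congr_left (fun p hp => this p hp)
      _ = xs := List.map_id xs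
  have hpermys : ys.Perm xs := by
    have h1 : ys.Perm ((xs.map (fun p => p.1)).map
        (fun k => (k, PySem.Dict.getD (PySem.Dict.mk xs) k ""))) := hskperm.map _
    have h2 : (xs.map (fun p => p.1)).map
        (fun k => (k, PySem.Dict.getD (PySem.Dict.mk xs) k "")) = xs := by
      rw [List.map_map]
      exact hmapself
    rwa [h2] at h1
  exact List.Perm.eq_of_pairwise
    (fun a b _ _ hab hba => absurd hba (not_lt_of_gt hab))
    hlt2 hltys (hperm2.trans hpermys.symm)

-- ===== VERDICT (by name: the statement is the Claim_ definition above) =====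
theorem get_sorted_keys_values_spec : Claim_equal_get_sorted_keys_values := by
  intro xs _ hpre
  show get_sorted_keys_values xs = get_sorted_keys_values_alt xs
  simp only [get_sorted_keys_values, get_sorted_keys_values_alt,
    PySem.List.foldl_append_singleton_eq_map, List.nil_append,
    pvMSort_eq xs hpre, List.map_map]
  simp [Function.comp_def]
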